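-- pv_equiv track=rewrite | github.com/Cambricon/torch_mlu | torch_mlu/mlu/__init__.py | _transform_uuid_to_ordinals
-- ===== SOURCE A (Python) =====
-- def _transform_uuid_to_ordinals(candidates, uuids):
--     r"""Given the set of partial uuids and list of known uuids builds a set of ordinals excluding ambiguous partials IDs."""
--
--     def uuid_to_orinal(candidate, uuids) -> int:
--         best_match = -1
--         for idx, uuid in enumerate(uuids):
--             if uuid == candidate:
--                 best_match = idx
--         return best_match
--
--     rc = []
--     for candidate in candidates:
--         idx = uuid_to_orinal(candidate, uuids)
--         # First invalid ordinal stops parsing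
--         if idx < 0:
--             break
--         # Duplicates result in empty set
--         if idx in rc:
--             return []
--         rc.append(idx)
--     return rc
-- ===== SOURCE B (Python) =====
-- def _transform_uuid_to_ordinals(candidates, uuids):
--     # Build last-index map once, translate all candidates, cut at first miss, then one dup check.
--     last = {}
--     for i, u in enumerate(uuids):
--         last[u] = i
--     ords = [last.get(c, -1) for c in candidates]
--     prefix = ords[:ords.index(-1)] if -1 in ords else ords
--     return [] if len(set(prefix)) != len(prefix) else prefix
-- ===== Notes on version B (the rewrite author's own statement) =====
-- stated objective: alternative
-- what changed: Instead of rescanning the whole uuid list for every candidate inside a stateful loop with early exits, B builds a last-index dict once, translates all candidates in one pass, cuts the list at the first miss, and does a single set-based duplicate check on that prefix.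
import Mathlib
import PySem

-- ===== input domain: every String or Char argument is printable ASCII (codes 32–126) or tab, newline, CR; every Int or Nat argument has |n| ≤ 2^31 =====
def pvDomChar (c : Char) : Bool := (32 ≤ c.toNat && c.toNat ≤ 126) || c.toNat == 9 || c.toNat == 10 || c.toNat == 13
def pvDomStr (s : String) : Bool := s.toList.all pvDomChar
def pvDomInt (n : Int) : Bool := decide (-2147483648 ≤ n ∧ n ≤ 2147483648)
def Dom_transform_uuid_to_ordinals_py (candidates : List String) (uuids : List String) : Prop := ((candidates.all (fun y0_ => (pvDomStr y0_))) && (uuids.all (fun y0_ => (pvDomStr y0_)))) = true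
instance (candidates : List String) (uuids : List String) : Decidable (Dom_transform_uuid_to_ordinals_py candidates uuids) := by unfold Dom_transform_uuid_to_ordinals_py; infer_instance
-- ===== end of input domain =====

-- B replaces A's per-candidate rescans of `uuids` by one last-index dict, a single
-- translation pass, a cut at the first miss and one duplicate check (objective: alternative).

-- ===== PORT A =====
-- inner helper uuid_to_orinal: scan uuids, remembering the LAST matching index
def pvUuidToOrdinal (candidate : String) (uuids : List String) : Int :=
  (PySem.List.enumerate uuids).foldl
    (fun best p => if p.2 == candidate then p.1 else best) (-1)

-- A's main loop over candidates with accumulator rc (early returns: break / return [])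
def pvGoA (uuids : List String) (rc : List Int) : List String → List Int
  | [] => rc
  | c :: cs =>
    let idx := pvUuidToOrdinal c uuids
    if idx < 0 then rc
    else if rc.contains idx then []
    else pvGoA uuids (rc ++ [idx]) cs

def transform_uuid_to_ordinals_py (candidates : List String) (uuids : List String) : List Int :=
  pvGoA uuids [] candidates

-- ===== PORT B =====
-- last = {}; for i, u in enumerate(uuids): last[u] = i
def pvLastIndex (uuids : List String) : PySem.Dict String Int :=
  (PySem.List.enumerate uuids).foldl (fun d p => d.insert p.2 p.1) PySem.Dict.empty

def transform_uuid_to_ordinals_py_alt (candidates : List String) (uuids : List String) : List Int :=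
  let last := pvLastIndex uuids
  let ords := candidates.map (fun c => last.getD c (-1))
  let pre := match PySem.List.index? ords (-1) with
    | some k => ords.take k        -- ords[:ords.index(-1)]
    | none => ords
  if (PySem.Set.ofList pre).length ≠ pre.length then [] else pre

-- ===== PRECONDITION & SPEC =====
def Spec_transform_uuid_to_ordinals_py (candidates : List String) (uuids : List String) (out : List Int) : Prop := out = transform_uuid_to_ordinals_py_alt candidates uuids
instance (candidates : List String) (uuids : List String) (out : List Int) : Decidable (Spec_transform_uuid_to_ordinals_py candidates uuids out) := by unfold Spec_transform_uuid_to_ordinals_py; infer_instance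

-- ===== CLAIM (what is proved, stated in full; the proofs are below) =====
def Claim_equal_transform_uuid_to_ordinals_py : Prop := ∀ (candidates : List String) (uuids : List String), Dom_transform_uuid_to_ordinals_py candidates uuids → Spec_transform_uuid_to_ordinals_py candidates uuids (transform_uuid_to_ordinals_py candidates uuids)

-- ===== LEMMAS AND PROOFS =====

-- the dict built by repeated insert looks up as the "last match" fold
theorem pv_getD_foldl_insert (c : String) (v : Int) :
    ∀ (ps : List (Int × String)) (d : PySem.Dict String Int),
    (ps.foldl (fun d p => d.insert p.2 p.1) d).getD c v
      = ps.foldl (fun best p => if p.2 == c then p.1 else best) (d.getD c v) := by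
  intro ps
  induction ps with
  | nil => intro d; rfl
  | cons p ps ih =>
    intro d
    simp only [List.foldl_cons, ih, PySem.Dict.getD_insert]
    by_cases h : p.2 = c
    · simp [h]
    · simp [h, Ne.symm h, beq_iff_eq]

theorem pv_ord_eq (c : String) (uuids : List String) :
    pvUuidToOrdinal c uuids = (pvLastIndex uuids).getD c (-1) := by
  unfold pvUuidToOrdinal pvLastIndex
  rw [pv_getD_foldl_insert]
  rfl

-- every ordinal produced by the fold is -1 or ≥ 0
theorem pv_foldl_best_nonneg (c : String) :
    ∀ (ps : List (Int × String)) (b : Int), (∀ p ∈ ps, 0 ≤ p.1) → (b = -1 ∨ 0 ≤ b) →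
    (ps.foldl (fun best p => if p.2 == c then p.1 else best) b = -1
      ∨ 0 ≤ ps.foldl (fun best p => if p.2 == c then p.1 else best) b) := by
  intro ps
  induction ps with
  | nil => intro b _ hb; exact hb
  | cons p ps ih =>
    intro b hps hb
    simp only [List.foldl_cons]
    refine ih _ (fun q hq => hps q (List.mem_cons_of_mem _ hq)) ?_
    by_cases h : p.2 == c
    · simp [h]; right; exact hps p (List.mem_cons_self ..)
    · simp [h]; exact hb

theorem pv_ord_cases (c : String) (uuids : List String) :
    pvUuidToOrdinal c uuids = -1 ∨ 0 ≤ pvUuidToOrdinal c uuids := by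
  unfold pvUuidToOrdinal
  refine pv_foldl_best_nonneg c _ (-1) ?_ (Or.inl rfl)
  intro p hp
  rw [PySem.List.mem_enumerate_iff] at hp
  obtain ⟨k, hk, rfl⟩ := hp
  simp

-- A's loop, fused over the list of ordinals
def pvF (rc : List Int) : List Int → List Int
  | [] => rc
  | o :: os => if o < 0 then rc else if rc.contains o then [] else pvF (rc ++ [o]) os

theorem pv_goA_eq_F (uuids : List String) :
    ∀ (cs : List String) (rc : List Int),
    pvGoA uuids rc cs = pvF rc (cs.map (fun c => pvUuidToOrdinal c uuids)) := by
  intro cs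
  induction cs with
  | nil => intro rc; rfl
  | cons c cs ih =>
    intro rc
    simp only [pvGoA, pvF, List.map_cons]
    by_cases h1 : pvUuidToOrdinal c uuids < 0
    · simp [h1]
    · by_cases h2 : rc.contains (pvUuidToOrdinal c uuids) <;> simp [h1, ih]

-- the index?-cut equals takeWhile (≠ -1)
theorem pv_cut_eq_takeWhile :
    ∀ (os : List Int),
    (match PySem.List.index? os (-1) with
      | some k => os.take k
      | none => os) = os.takeWhile (fun o => !(o == -1)) := by
  intro os
  induction os with
  | nil => simp [PySem.List.index?_eq_idxOf?]
  | cons o os ih =>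
    by_cases h : o = -1
    · subst h
      rw [PySem.List.index?_cons_self]
      simp
    · rw [PySem.List.index?_cons_of_ne os h]
      cases hid : PySem.List.index? os (-1) with
      | none =>
        rw [hid] at ih
        simp only [Option.map_none]
        simp at ih
        simp [h, ← ih]
      | some k =>
        rw [hid] at ih
        simp only [Option.map_some]
        simp at ih
        simp [h, List.take_succ_cons, ih]

-- main invariant: pvF returns the accumulated prefix, or [] on a duplicate
theorem pv_F_char :
    ∀ (os : List Int) (rc : List Int), (∀ o ∈ os, o = -1 ∨ 0 ≤ o) → rc.Nodup →
    pvF rc os =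
      (if (rc ++ os.takeWhile (fun o => !(o == -1))).Nodup
        then rc ++ os.takeWhile (fun o => !(o == -1)) else []) := by
  intro os
  induction os with
  | nil => intro rc _ hrc; simp [pvF, hrc]
  | cons o os ih =>
    intro rc hos hrc
    rcases hos o (List.mem_cons_self ..) with h1 | h1
    · subst h1
      simp [pvF, hrc]
    · have hne : ¬ o = -1 := by omega
      have hlt : ¬ o < 0 := by omega
      have htw : (o :: os).takeWhile (fun o => !(o == -1))
          = o :: os.takeWhile (fun o => !(o == -1)) := by
        simp [hne]
      rw [htw]
      by_cases hmem : rc.contains o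
      · have hm : o ∈ rc := by simpa using hmem
        have hnotnd : ¬ (rc ++ o :: os.takeWhile (fun o => !(o == -1))).Nodup := by
          intro hnd
          exact (List.nodup_append.mp hnd).2.2 o hm o (List.mem_cons_self ..) rfl
        simp [pvF, hlt, hm, hnotnd]
      · have hm : o ∉ rc := by simpa using hmem
        have hrc' : (rc ++ [o]).Nodup := by
          simp [List.nodup_append, hrc]
          intro a ha hb
          subst hb
          exact hm ha
        have hstep : pvF rc (o :: os) = pvF (rc ++ [o]) os := by
          simp [pvF, hlt, hm]
        rw [hstep, ih (rc ++ [o]) (fun q hq => hos q (List.mem_cons_of_mem _ hq)) hrc',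
          List.append_assoc, List.singleton_append]

-- the Set length test is exactly the Nodup test
theorem pv_ofList_sublist {α : Type} [BEq α] [LawfulBEq α] :
    ∀ (xs : List α), (PySem.Set.ofList xs).Sublist xs := by
  intro xs
  induction xs using List.reverseRecOn with
  | nil => simp [PySem.Set.ofList_nil]
  | append_singleton xs x ih =>
    rw [PySem.Set.ofList_append_singleton, PySem.Set.add_eq_ite]
    by_cases h : x ∈ PySem.Set.ofList xs
    · rw [if_pos h]
      exact ih.trans (List.sublist_append_left xs [x])
    · rw [if_neg h]
      exact ih.append (List.Sublist.refl [x])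

theorem pv_len_ofList_iff (xs : List Int) :
    (PySem.Set.ofList xs).length = xs.length ↔ xs.Nodup := by
  constructor
  · intro h
    have := (pv_ofList_sublist xs).eq_of_length h
    rw [← this]
    exact PySem.Set.nodup_ofList xs
  · intro h
    rw [PySem.Set.ofList_eq_self_of_nodup _ h]

-- ===== VERDICT (by name: the statement is the Claim_ definition above) =====
theorem transform_uuid_to_ordinals_py_spec : Claim_equal_transform_uuid_to_ordinals_py := by
  intro candidates uuids _
  unfold Spec_transform_uuid_to_ordinals_py transform_uuid_to_ordinals_py
    transform_uuid_to_ordinals_py_alt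
  rw [pv_goA_eq_F]
  have hmap : candidates.map (fun c => (pvLastIndex uuids).getD c (-1))
      = candidates.map (fun c => pvUuidToOrdinal c uuids) := by
    simp [pv_ord_eq]
  simp only [← hmap] at *
  set os := candidates.map (fun c => (pvLastIndex uuids).getD c (-1)) with hos
  have hvals : ∀ o ∈ os, o = -1 ∨ 0 ≤ o := by
    intro o ho
    rw [hos, List.mem_map] at ho
    obtain ⟨c, _, rfl⟩ := ho
    rw [← pv_ord_eq]
    exact pv_ord_cases c uuids
  rw [pv_F_char os [] hvals List.nodup_nil, pv_cut_eq_takeWhile]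
  set pre := os.takeWhile (fun o => !(o == -1))
  by_cases hnd : pre.Nodup
  · simp [hnd, (pv_len_ofList_iff pre).mpr hnd]
  · have : (PySem.Set.ofList pre).length ≠ pre.length := fun h => hnd ((pv_len_ofList_iff pre).mp h)
    simp [hnd, this]
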